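-- pv_equiv track=rewrite | github.com/Usman-Rasheed-Siddiqui/winter-activity-Logic-Forge-CIS-Community | Week 2/challenge_3_mirror_quest.py | find_longest_mirror_length
-- ===== SOURCE A (Python) =====
-- def find_longest_mirror_length(s):
--
--     length = len(s)
--
--     if length == 1:
--         return 1
--
--     i = 0
--     j = len(s) - 1
--
--     while i < j:
--         if s[i] != s[j]:
--             max_string = max(s[i + 1:], s[i: j])
--             return find_longest_mirror_length(max_string)
--
--         else:
--             return 2 + find_longest_mirror_length(s[i + 1: ])
-- ===== SOURCE B (Python) =====
-- def find_longest_mirror_length(s):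
--     add = 0
--     while len(s) > 1:
--         if s[0] != s[-1]:
--             s = max(s[1:], s[:-1])
--         else:
--             add += 2
--             s = s[1:]
--     return add + 1
-- ===== Notes on version B (the rewrite author's own statement) =====
-- stated objective: simpler
-- what changed: Replaced A's recursion (which pushes '2 +' onto the call stack at every matching end-pair and re-slices inside a vestigial while loop) by a single iterative while loop threading an explicit add accumulator.
-- outside the precondition, e.g. on find_longest_mirror_length(''): A returns None, B returns 1
import Mathlib
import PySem

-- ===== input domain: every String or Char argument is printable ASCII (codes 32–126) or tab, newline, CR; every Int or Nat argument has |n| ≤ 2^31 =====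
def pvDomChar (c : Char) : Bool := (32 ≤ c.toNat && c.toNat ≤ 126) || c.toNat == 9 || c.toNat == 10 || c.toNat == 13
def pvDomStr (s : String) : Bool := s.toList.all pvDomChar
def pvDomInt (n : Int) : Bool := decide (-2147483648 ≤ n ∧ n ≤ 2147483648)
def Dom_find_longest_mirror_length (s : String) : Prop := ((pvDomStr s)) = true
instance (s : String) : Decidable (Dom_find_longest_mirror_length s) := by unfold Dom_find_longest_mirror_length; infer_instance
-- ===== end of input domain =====

-- B replaces A's recursion (which re-adds 2 at every return) by a single while loop threading an
-- explicit `add` accumulator; same values on every nonempty string (objective: simpler/iterative).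

-- ===== PORT A =====
-- Python's max(x, y) on two strings: y if x < y else x (code-point lexicographic '<').
def pyMaxStr (x y : List Char) : List Char := if x < y then y else x

-- needed by the termination proofs of both ports (cited in decreasing_by)
theorem pyMaxStr_cases (x y : List Char) : pyMaxStr x y = y ∨ pyMaxStr x y = x := by
  unfold pyMaxStr; split <;> simp

def fA : List Char → Int
  | [] => 0  -- Python A falls off the while loop and returns None here; excluded by Pre_
  | [_] => 1
  | a :: b :: t =>
      -- i = 0, j = len(s)-1: s[i] = a, s[j] = last; s[i+1:] = b :: t, s[i:j] = dropLast
      if a ≠ (b :: t).getLast (by simp) then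
        fA (pyMaxStr (b :: t) ((a :: b :: t).dropLast))
      else 2 + fA (b :: t)
termination_by l => l.length
decreasing_by
  · rcases pyMaxStr_cases (b :: t) ((a :: b :: t).dropLast) with h | h <;> rw [h] <;> simp
  · simp

def find_longest_mirror_length (s : String) : Int := fA s.toList

-- ===== PORT B =====
-- the `while len(s) > 1` loop of Source B, state = (current string, add)
def fBloop (l : List Char) (add : Int) : Int :=
  if h1 : l.length ≤ 1 then add + 1
  else if l.headD ' ' ≠ l.getLastD ' ' then
    fBloop (pyMaxStr (l.drop 1) l.dropLast) add
  else
    fBloop (l.drop 1) (add + 2)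
termination_by l.length
decreasing_by
  · rcases pyMaxStr_cases (l.drop 1) l.dropLast with h | h <;> rw [h] <;> simp <;> omega
  · simp; omega

def find_longest_mirror_length_alt (s : String) : Int := fBloop s.toList 0

-- ===== PRECONDITION & SPEC =====
-- Pre_ excludes only the empty string, on which Python A falls off its loop and returns None
-- (no int); B naturally returns 1 there.
def Pre_find_longest_mirror_length (s : String) : Prop := s ≠ ""
instance (s : String) : Decidable (Pre_find_longest_mirror_length s) := by
  unfold Pre_find_longest_mirror_length; infer_instance
def pvWitness_find_longest_mirror_length : String := "abcba"

def Spec_find_longest_mirror_length (s : String) (out : Int) : Prop := out = find_longest_mirror_length_alt s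
instance (s : String) (out : Int) : Decidable (Spec_find_longest_mirror_length s out) := by
  unfold Spec_find_longest_mirror_length; infer_instance

-- ===== CLAIM (what is proved, stated in full; the proofs are below) =====
def Claim_equal_find_longest_mirror_length : Prop := ∀ (s : String), Dom_find_longest_mirror_length s → Pre_find_longest_mirror_length s → Spec_find_longest_mirror_length s (find_longest_mirror_length s)

-- ===== LEMMAS AND PROOFS =====

theorem fBloop_eq (n : Nat) : ∀ (l : List Char), l.length ≤ n → l ≠ [] →
    ∀ add : Int, fBloop l add = add + fA l := by
  induction n with
  | zero => intro l hl hne; cases l <;> simp at hl hne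
  | succ n ih =>
    intro l hl hne add
    match l with
    | [c] => simp [fBloop, fA]
    | a :: b :: t =>
      have hlast : (a :: b :: t).getLastD ' ' = (b :: t).getLast (by simp) := by
        rw [List.getLastD_eq_getLast?,
            List.getLast?_eq_some_getLast (l := a :: b :: t) (by simp)]
        simp [List.getLast_cons]
      rw [fBloop, fA, dif_neg (by simp), List.headD_cons, hlast, List.drop_one, List.tail_cons]
      by_cases hc : a = (b :: t).getLast (by simp)
      · rw [if_neg (by simp [hc]), if_neg (by simp [hc]),
            ih (b :: t) (by simp at hl ⊢; omega) (by simp) (add + 2)]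
        ring
      · rw [if_pos hc, if_pos hc]
        have hM := pyMaxStr_cases (b :: t) ((a :: b :: t).dropLast)
        have hlen : (pyMaxStr (b :: t) ((a :: b :: t).dropLast)).length ≤ n := by
          rcases hM with h | h <;> rw [h] <;> simp at hl ⊢ <;> omega
        have hne' : pyMaxStr (b :: t) ((a :: b :: t).dropLast) ≠ [] := by
          rcases hM with h | h <;> rw [h] <;> simp
        exact ih _ hlen hne' add

-- ===== VERDICT (by name: the statement is the Claim_ definition above) =====
theorem find_longest_mirror_length_spec : Claim_equal_find_longest_mirror_length := by
  intro s _ hpre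
  unfold Spec_find_longest_mirror_length find_longest_mirror_length find_longest_mirror_length_alt
  have hne : s.toList ≠ [] := by
    intro hl
    exact hpre (by have := congrArg String.ofList hl; simpa using this)
  rw [fBloop_eq s.toList.length s.toList le_rfl hne 0]
  ring
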